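-- pv_equiv track=rewrite | github.com/bruno-von-bruening/qcAPI_fork | run_psi4_2.py | process_method
-- ===== SOURCE A (Python) =====
-- def process_method(func, basis_set):
--     # Check for grac
--     func_comp=func.upper().split('-')
--     grac_comp=[x for x in  func_comp if x.upper() in ['GRAC'] ]
--     do_grac=False
--     if len(grac_comp)>0:
--         func='-'.join([x for x in func_comp if not x in grac_comp ])
--         do_grac=True
--
--     # Check for IP-tuned
--     ip_tags=['IPTUNED','IPTUNING']
--     func_comp=func.upper().split('-')
--     ip_comp=[x for x in func_comp if x.upper() in ip_tags]
--     do_ip_tune=False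
--     if len(ip_comp)>0:
--         func='-'.join([x for x in func_comp if not x in ip_comp])
--         do_ip_tune=True
--
--
--     def splitter(string):
--         split=[ x.strip() for x in string.split('\n') ]
--         return '\n'.join(split)
--
--     return func, basis_set, do_ip_tune, do_grac
-- ===== SOURCE B (Python) =====
-- def process_method(func, basis_set):
--     # One pass over the tokens of func.upper(): classify each token, keep the rest;
--     # func is only rebuilt (uppercased, tags removed) when a tag was found.
--     kept = []
--     do_grac = False
--     do_ip_tune = False
--     for tok in func.upper().split('-'):
--         if tok == 'GRAC':
--             do_grac = True
--         elif tok in ('IPTUNED', 'IPTUNING'):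
--             do_ip_tune = True
--         else:
--             kept.append(tok)
--     if do_grac or do_ip_tune:
--         func = '-'.join(kept)
--     return func, basis_set, do_ip_tune, do_grac
-- ===== Notes on version B (the rewrite author's own statement) =====
-- stated objective: simpler
-- what changed: Replaces A's two split/filter/join passes (re-splitting the rebuilt string for the IP check) by a single split and one loop that classifies each token, joining the kept tokens once at the end.
import Mathlib
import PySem

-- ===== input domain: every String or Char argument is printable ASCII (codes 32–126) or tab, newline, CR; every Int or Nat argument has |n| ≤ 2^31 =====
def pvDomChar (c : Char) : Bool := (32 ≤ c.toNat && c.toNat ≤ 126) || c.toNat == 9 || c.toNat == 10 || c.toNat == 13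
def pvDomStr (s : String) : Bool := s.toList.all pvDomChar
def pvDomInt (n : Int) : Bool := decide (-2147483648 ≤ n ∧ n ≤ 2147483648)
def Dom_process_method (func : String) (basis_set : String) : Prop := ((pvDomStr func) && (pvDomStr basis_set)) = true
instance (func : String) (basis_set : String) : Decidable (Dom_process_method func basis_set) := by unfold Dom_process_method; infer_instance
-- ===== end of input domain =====

-- B replaces A's two split/filter/join passes by a single split and one classifying loop (objective: simpler).

-- ===== PORT A =====
def process_method (func : String) (basis_set : String) : String × String × Bool × Bool :=
  -- func_comp = func.upper().split('-')   ('-'.toList = ['-'])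
  let func0 := func.toList
  let func_comp := PySem.Chars.splitOn (PySem.Chars.upper func0) ['-']
  -- grac_comp = [x for x in func_comp if x.upper() in ['GRAC']]
  let grac_comp := func_comp.filter (fun x => ["GRAC".toList].contains (PySem.Chars.upper x))
  let do_grac := decide (grac_comp.length > 0)
  let func1 := if grac_comp.length > 0 then
      PySem.Chars.join ['-'] (func_comp.filter (fun x => !(grac_comp.contains x)))
    else func0
  -- ip_tags = ['IPTUNED','IPTUNING']
  let ip_tags : List (List Char) := ["IPTUNED".toList, "IPTUNING".toList]
  let func_comp2 := PySem.Chars.splitOn (PySem.Chars.upper func1) ['-']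
  let ip_comp := func_comp2.filter (fun x => ip_tags.contains (PySem.Chars.upper x))
  let do_ip_tune := decide (ip_comp.length > 0)
  let func2 := if ip_comp.length > 0 then
      PySem.Chars.join ['-'] (func_comp2.filter (fun x => !(ip_comp.contains x)))
    else func1
  (String.ofList func2, basis_set, do_ip_tune, do_grac)

-- ===== PORT B =====
def process_method_alt (func : String) (basis_set : String) : String × String × Bool × Bool :=
  -- one pass over the tokens of func.upper().split('-'); state = (kept, do_grac, do_ip_tune)
  let st := (PySem.Chars.splitOn (PySem.Chars.upper func.toList) ['-']).foldl
    (fun (acc : List (List Char) × Bool × Bool) tok =>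
      if tok == "GRAC".toList then (acc.1, true, acc.2.2)
      else if tok == "IPTUNED".toList || tok == "IPTUNING".toList then (acc.1, acc.2.1, true)
      else (acc.1 ++ [tok], acc.2.1, acc.2.2))
    ([], false, false)
  let func' := if st.2.1 || st.2.2 then String.ofList (PySem.Chars.join ['-'] st.1) else func
  (func', basis_set, st.2.2, st.2.1)

-- ===== PRECONDITION & SPEC =====
def Spec_process_method (func : String) (basis_set : String) (out : String × String × Bool × Bool) : Prop := out = process_method_alt func basis_set
instance (func : String) (basis_set : String) (out : String × String × Bool × Bool) : Decidable (Spec_process_method func basis_set out) := by unfold Spec_process_method; infer_instance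

-- ===== CLAIM (what is proved, stated in full; the proofs are below) =====
def Claim_equal_process_method : Prop := ∀ (func : String) (basis_set : String), Dom_process_method func basis_set → Spec_process_method func basis_set (process_method func basis_set)

-- ===== LEMMAS AND PROOFS =====

/-- Reference splitter: what Python's s.split('-') computes, written structurally. -/
def split1 (pre : List Char) : List Char → List (List Char)
  | [] => [pre]
  | c :: rest => if c = '-' then pre :: split1 [] rest else split1 (pre ++ [c]) rest

theorem go_eq_split1 : ∀ (fuel : Nat) (l cur : List Char) (acc : List (List Char)), l.length < fuel →
    PySem.Chars.splitOn.go ['-'] fuel l cur acc = acc.reverse ++ split1 cur.reverse l := by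
  intro fuel
  induction fuel with
  | zero => intro l cur acc h; omega
  | succ n ih =>
    intro l cur acc h
    cases l with
    | nil => simp [PySem.Chars.splitOn.go, split1]
    | cons c rest =>
      by_cases hc : c = '-'
      · subst hc
        rw [show PySem.Chars.splitOn.go ['-'] (n+1) ('-' :: rest) cur acc
            = PySem.Chars.splitOn.go ['-'] n rest [] (cur.reverse :: acc) by
          simp [PySem.Chars.splitOn.go, List.isPrefixOf]]
        rw [ih rest [] (cur.reverse :: acc) (by simpa using Nat.lt_of_succ_lt_succ h)]
        simp [split1]
      · rw [show PySem.Chars.splitOn.go ['-'] (n+1) (c :: rest) cur acc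
            = PySem.Chars.splitOn.go ['-'] n rest (c :: cur) acc by
          simp [PySem.Chars.splitOn.go, List.isPrefixOf, Ne.symm hc]]
        rw [ih rest (c :: cur) acc (by simpa using Nat.lt_of_succ_lt_succ h)]
        simp [split1, hc]

theorem splitOn_eq_split1 (s : List Char) : PySem.Chars.splitOn s ['-'] = split1 [] s := by
  have := go_eq_split1 (s.length + 1) s [] [] (by omega)
  simpa [PySem.Chars.splitOn] using this

theorem upperChar_idem (c : Char) : PySem.Chars.upperChar (PySem.Chars.upperChar c) = PySem.Chars.upperChar c := by
  unfold PySem.Chars.upperChar PySem.Chars.islower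
  by_cases h : 'a' ≤ c ∧ c ≤ 'z'
  · have h1 : (97:Nat) ≤ c.toNat := Fin.mk_le_mk.mp h.1
    have h2 : c.toNat ≤ 122 := Fin.mk_le_mk.mp h.2
    have ht : (Char.ofNat (c.toNat - 32)).toNat = c.toNat - 32 := by
      rw [Char.toNat_ofNat, if_pos]; exact Or.inl (by omega)
    have hna : ¬ ('a' ≤ Char.ofNat (c.toNat - 32)) := by
      intro hc
      have h3 : (97:Nat) ≤ (Char.ofNat (c.toNat - 32)).toNat := Fin.mk_le_mk.mp hc
      omega
    simp [h.1, h.2, hna]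
  · have : ¬ ('a' ≤ c) ∨ ¬ (c ≤ 'z') := by tauto
    rcases this with hc | hc <;> simp [hc]

theorem split1_mem : ∀ (s pre : List Char), '-' ∉ pre →
    ∀ t ∈ split1 pre s, '-' ∉ t ∧ ∀ c ∈ t, c ∈ pre ∨ c ∈ s := by
  intro s
  induction s with
  | nil =>
    intro pre hpre t ht
    simp [split1] at ht
    subst ht
    exact ⟨hpre, fun c hc => Or.inl hc⟩
  | cons c rest ih =>
    intro pre hpre t ht
    by_cases hc : c = '-'
    · subst hc
      simp [split1] at ht
      rcases ht with ht | ht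
      · subst ht; exact ⟨hpre, fun d hd => Or.inl hd⟩
      · rcases ih [] (by simp) t ht with ⟨h1, h2⟩
        refine ⟨h1, fun d hd => ?_⟩
        rcases h2 d hd with h | h
        · simp at h
        · exact Or.inr (by simp [h])
    · rw [split1, if_neg hc] at ht
      have hpre' : '-' ∉ pre ++ [c] := by
        simp [hpre]; exact fun h => hc h.symm
      rcases ih (pre ++ [c]) hpre' t ht with ⟨h1, h2⟩
      refine ⟨h1, fun d hd => ?_⟩
      rcases h2 d hd with h | h
      · rcases List.mem_append.mp h with h | h
        · exact Or.inl h
        · simp at h; subst h; exact Or.inr (by simp)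
      · exact Or.inr (by simp [h])

theorem mem_upper_fixed {c : Char} {s : List Char} (h : c ∈ PySem.Chars.upper s) :
    PySem.Chars.upperChar c = c := by
  unfold PySem.Chars.upper at h
  rcases List.mem_map.mp h with ⟨c0, _, rfl⟩
  exact upperChar_idem c0

theorem upper_fixed {t : List Char} (h : ∀ c ∈ t, PySem.Chars.upperChar c = c) :
    PySem.Chars.upper t = t := by
  unfold PySem.Chars.upper
  rw [show t.map PySem.Chars.upperChar = t.map id from List.map_congr_left h, List.map_id]

/-- Each token of split1 [] (upper s) is dash-free and fixed by upper. -/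
theorem toks_fact (s : List Char) :
    ∀ t ∈ split1 [] (PySem.Chars.upper s), '-' ∉ t ∧ PySem.Chars.upper t = t := by
  intro t ht
  rcases split1_mem (PySem.Chars.upper s) [] (by simp) t ht with ⟨h1, h2⟩
  refine ⟨h1, upper_fixed fun c hc => ?_⟩
  rcases h2 c hc with h | h
  · simp at h
  · exact mem_upper_fixed h

theorem map_upper_fixed {l : List (List Char)} (h : ∀ t ∈ l, PySem.Chars.upper t = t) :
    l.map PySem.Chars.upper = l := by
  rw [show l.map PySem.Chars.upper = l.map id from List.map_congr_left h, List.map_id]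

theorem intercalate_cons₂ (y : List Char) (ys : List (List Char)) (h : ys ≠ []) :
    List.intercalate ['-'] (y :: ys) = y ++ '-' :: List.intercalate ['-'] ys := by
  cases ys with
  | nil => simp at h
  | cons b bs => simp [List.intercalate, List.intersperse]

theorem upper_intercalate (ys : List (List Char)) :
    PySem.Chars.upper (List.intercalate ['-'] ys) =
      List.intercalate ['-'] (ys.map PySem.Chars.upper) := by
  induction ys with
  | nil => simp [List.intercalate, PySem.Chars.upper]
  | cons y ys ih =>
    cases ys with
    | nil => simp [List.intercalate, PySem.Chars.upper]
    | cons b bs =>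
      rw [List.map_cons, intercalate_cons₂ y (b :: bs) (by simp),
          intercalate_cons₂ (PySem.Chars.upper y) ((b :: bs).map PySem.Chars.upper) (by simp),
          ← ih]
      show PySem.Chars.upper (y ++ '-' :: List.intercalate ['-'] (b :: bs)) = _
      simp [PySem.Chars.upper, show PySem.Chars.upperChar '-' = '-' from by decide]

theorem split1_append_no_dash (y : List Char) : ∀ (pre rest : List Char), '-' ∉ y →
    split1 pre (y ++ rest) = split1 (pre ++ y) rest := by
  induction y with
  | nil => intro pre rest _; simp
  | cons c y ih =>
    intro pre rest h
    have hc : c ≠ '-' := fun hc => h (by simp [hc])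
    rw [List.cons_append, split1, if_neg hc, ih (pre ++ [c]) rest (fun hy => h (by simp [hy]))]
    simp

theorem split1_intercalate : ∀ (ys : List (List Char)) (y pre : List Char),
    (∀ t ∈ y :: ys, '-' ∉ t) →
    split1 pre (List.intercalate ['-'] (y :: ys)) = (pre ++ y) :: ys := by
  intro ys
  induction ys with
  | nil =>
    intro y pre h
    rw [show List.intercalate ['-'] [y] = y ++ [] by simp [List.intercalate]]
    rw [split1_append_no_dash y pre [] (h y (by simp))]
    simp [split1]
  | cons b bs ih =>
    intro y pre h
    rw [intercalate_cons₂ y (b :: bs) (by simp)]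
    rw [split1_append_no_dash y pre ('-' :: List.intercalate ['-'] (b :: bs)) (h y (by simp))]
    rw [split1, if_pos rfl]
    rw [show split1 [] (List.intercalate ['-'] (b :: bs)) = ([] ++ b) :: bs from
      ih b [] (fun t ht => h t (by simp at ht ⊢; tauto))]
    simp

/-- B's loop, solved: kept tokens, grac flag, ip flag. -/
theorem foldB_gen (G T1 T2 : List Char) (hGT1 : G ≠ T1) (hGT2 : G ≠ T2) :
    ∀ (l kept : List (List Char)) (g i : Bool),
    l.foldl (fun (acc : List (List Char) × Bool × Bool) tok =>
      if tok == G then (acc.1, true, acc.2.2)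
      else if tok == T1 || tok == T2 then (acc.1, acc.2.1, true)
      else (acc.1 ++ [tok], acc.2.1, acc.2.2)) (kept, g, i)
    = (kept ++ l.filter (fun t => !(t == G) && !(t == T1 || t == T2)),
       g || l.any (fun t => t == G),
       i || l.any (fun t => t == T1 || t == T2)) := by
  intro l
  induction l with
  | nil => intro kept g i; simp
  | cons t l ih =>
    intro kept g i
    rw [List.foldl_cons]
    by_cases h1 : t = G
    · subst h1
      rw [if_pos (by simp)]
      rw [ih]
      simp [beq_false_of_ne hGT1, beq_false_of_ne hGT2]
    · rw [if_neg (by simp [h1])]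
      by_cases h2 : t = T1 ∨ t = T2
      · rw [if_pos (by rcases h2 with h | h <;> simp [h])]
        rw [ih]
        rcases h2 with h | h <;> subst h <;> simp [beq_false_of_ne h1]
      · rcases not_or.mp h2 with ⟨h2a, h2b⟩
        rw [if_neg (by simp [h2a, h2b])]
        rw [ih]
        simp [beq_false_of_ne h1, beq_false_of_ne h2a, beq_false_of_ne h2b]

-- a token satisfying the ip test is never the GRAC token
theorem ip_ne_grac (t : List Char) :
    (!(t == "GRAC".toList) && (t == "IPTUNED".toList || t == "IPTUNING".toList))
      = (t == "IPTUNED".toList || t == "IPTUNING".toList) := by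
  by_cases h : t = "GRAC".toList
  · subst h; decide
  · simp only [beq_false_of_ne h, Bool.not_false, Bool.true_and]

theorem ip_contains (x : List Char) :
    (["IPTUNED".toList, "IPTUNING".toList].contains x)
      = (x == "IPTUNED".toList || x == "IPTUNING".toList) := by
  rw [List.contains_cons, List.contains_cons]
  simp [List.contains_eq_mem]

-- ===== VERDICT (by name: the statement is the Claim_ definition above) =====
theorem process_method_spec : Claim_equal_process_method := by
  intro func basis_set _hdom
  unfold Spec_process_method process_method process_method_alt
  simp only [splitOn_eq_split1, PySem.Chars.join]
  have hfix := toks_fact func.toList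
  set toks := split1 [] (PySem.Chars.upper func.toList) with htoks
  rw [foldB_gen "GRAC".toList "IPTUNED".toList "IPTUNING".toList (by decide) (by decide)]
  simp only [Bool.false_or, List.nil_append]
  -- grac_comp in canonical form
  have hg1 : toks.filter (fun x => ["GRAC".toList].contains (PySem.Chars.upper x))
      = toks.filter (fun x => x == "GRAC".toList) := by
    apply List.filter_congr
    intro x hx
    rw [(hfix x hx).2, List.contains_cons,
        show (([] : List (List Char)).contains x) = false from rfl, Bool.or_false]
  rw [hg1]
  by_cases hg : "GRAC".toList ∈ toks
  · -- GRAC present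
    have hlen : (toks.filter (fun x => x == "GRAC".toList)).length > 0 :=
      List.length_pos_of_mem (List.mem_filter.mpr ⟨hg, by simp⟩)
    have hany : (toks.any fun t => t == "GRAC".toList) = true :=
      List.any_eq_true.mpr ⟨_, hg, by simp⟩
    rw [if_pos hlen, hany]
    have hf1 : toks.filter (fun x => !((toks.filter (fun x => x == "GRAC".toList)).contains x))
        = toks.filter (fun x => !(x == "GRAC".toList)) := by
      apply List.filter_congr
      intro x hx
      congr 1
      by_cases h : x = "GRAC".toList
      · have hmem : x ∈ List.filter (fun x => x == "GRAC".toList) toks :=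
          List.mem_filter.mpr ⟨hx, by simp [h]⟩
        rw [List.contains_eq_mem, decide_eq_true hmem, h]
        exact (beq_self_eq_true _).symm
      · have hnx : x ∉ List.filter (fun x => x == "GRAC".toList) toks := fun hmem =>
          h (by simpa using (List.mem_filter.mp hmem).2)
        rw [List.contains_eq_mem, decide_eq_false hnx, beq_false_of_ne h]
    rw [hf1]
    obtain ⟨ys, hysdef⟩ : ∃ ys, List.filter (fun x => !(x == "GRAC".toList)) toks = ys := ⟨_, rfl⟩
    rw [hysdef]
    have hsub : ∀ t ∈ ys, t ∈ toks := by
      intro t ht; rw [← hysdef] at ht; exact List.mem_of_mem_filter ht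
    have hysfix : ∀ t ∈ ys, '-' ∉ t ∧ PySem.Chars.upper t = t := fun t ht => hfix t (hsub t ht)
    have hup : PySem.Chars.upper (List.intercalate ['-'] ys) = List.intercalate ['-'] ys := by
      rw [upper_intercalate, map_upper_fixed (fun t ht => (hysfix t ht).2)]
    rw [hup]
    have hkept : toks.filter (fun t => !(t == "GRAC".toList) && !(t == "IPTUNED".toList || t == "IPTUNING".toList))
        = ys.filter (fun t => !(t == "IPTUNED".toList || t == "IPTUNING".toList)) := by
      rw [← hysdef, List.filter_filter]
      exact List.filter_congr (fun x _ => Bool.and_comm _ _)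
    have hanyip : (toks.any fun t => t == "IPTUNED".toList || t == "IPTUNING".toList)
        = (ys.any fun t => t == "IPTUNED".toList || t == "IPTUNING".toList) := by
      rw [← hysdef, List.any_filter]
      exact congrArg (List.any toks) (funext fun t => (ip_ne_grac t).symm)
    rw [hkept, hanyip]
    cases ys with
    | nil =>
      rw [show List.intercalate ['-'] ([] : List (List Char)) = [] by simp [List.intercalate]]
      rw [show split1 [] ([] : List Char) = [[]] from rfl]
      rw [show (List.filter (fun x => ["IPTUNED".toList, "IPTUNING".toList].contains (PySem.Chars.upper x)) [[]] : List (List Char)) = [] from rfl]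
      simp
      exact ⟨by simp [List.intercalate], hg⟩
    | cons y ys' =>
      rw [split1_intercalate ys' y [] (fun t ht => (hysfix t ht).1)]
      rw [List.nil_append]
      have hi1 : (y :: ys').filter (fun x => ["IPTUNED".toList, "IPTUNING".toList].contains (PySem.Chars.upper x))
          = (y :: ys').filter (fun x => x == "IPTUNED".toList || x == "IPTUNING".toList) := by
        apply List.filter_congr
        intro x hx
        rw [(hysfix x hx).2, ip_contains]
      rw [hi1]
      by_cases hip : ((y :: ys').any fun t => t == "IPTUNED".toList || t == "IPTUNING".toList) = true
      · have hiplen : ((y :: ys').filter (fun x => x == "IPTUNED".toList || x == "IPTUNING".toList)).length > 0 := by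
          rcases List.any_eq_true.mp hip with ⟨t, ht, hpt⟩
          exact List.length_pos_of_mem (List.mem_filter.mpr ⟨ht, hpt⟩)
        rw [if_pos hiplen, hip]
        have hf2 : (y :: ys').filter (fun x => !(((y :: ys').filter (fun x => x == "IPTUNED".toList || x == "IPTUNING".toList)).contains x))
            = (y :: ys').filter (fun x => !(x == "IPTUNED".toList || x == "IPTUNING".toList)) := by
          apply List.filter_congr
          intro x hx
          congr 1
          by_cases h : (x == "IPTUNED".toList || x == "IPTUNING".toList) = true
          · have hmem : x ∈ (y :: ys').filter (fun x => x == "IPTUNED".toList || x == "IPTUNING".toList) :=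
              List.mem_filter.mpr ⟨hx, h⟩
            rw [List.contains_eq_mem, decide_eq_true hmem, h]
          · have hnx : x ∉ (y :: ys').filter (fun x => x == "IPTUNED".toList || x == "IPTUNING".toList) := fun hmem =>
              h ((List.mem_filter.mp hmem).2)
            rw [List.contains_eq_mem, decide_eq_false hnx, Bool.eq_false_iff.mpr h]
        rw [hf2]
        simp
        exact ⟨by simpa using hip, hg⟩
      · have hipf : ((y :: ys').any fun t => t == "IPTUNED".toList || t == "IPTUNING".toList) = false :=
          Bool.eq_false_iff.mpr hip
        have hipnil : (y :: ys').filter (fun x => x == "IPTUNED".toList || x == "IPTUNING".toList) = [] := by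
          rw [List.filter_eq_nil_iff]
          intro x hx hpx
          exact hip (List.any_eq_true.mpr ⟨x, hx, hpx⟩)
        rw [hipnil, hipf]
        have hself : (y :: ys').filter (fun t => !(t == "IPTUNED".toList || t == "IPTUNING".toList)) = (y :: ys') :=
          List.filter_eq_self.mpr (fun x hx => by
            have h : ¬ ((x == "IPTUNED".toList || x == "IPTUNING".toList) = true) :=
              fun hh => hip (List.any_eq_true.mpr ⟨x, hx, hh⟩)
            simpa using h)
        rw [hself]
        simp
        exact hg
  · -- GRAC absent
    have hnil : toks.filter (fun x => x == "GRAC".toList) = [] := by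
      rw [List.filter_eq_nil_iff]
      intro x hx hpx
      exact hg (by rw [← (beq_iff_eq).mp hpx]; exact hx)
    have hanyg : (toks.any fun t => t == "GRAC".toList) = false := by
      rw [Bool.eq_false_iff]
      intro h
      rcases List.any_eq_true.mp h with ⟨t, ht, hpt⟩
      exact hg (by rw [← (beq_iff_eq).mp hpt]; exact ht)
    rw [hnil, hanyg]
    rw [if_neg (show ¬((([] : List (List Char))).length > 0) by simp)]
    rw [← htoks]
    have hkept : toks.filter (fun t => !(t == "GRAC".toList) && !(t == "IPTUNED".toList || t == "IPTUNING".toList))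
        = toks.filter (fun t => !(t == "IPTUNED".toList || t == "IPTUNING".toList)) := by
      apply List.filter_congr
      intro x hx
      have hne : x ≠ "GRAC".toList := fun h => hg (h ▸ hx)
      rw [beq_false_of_ne hne, Bool.not_false, Bool.true_and]
    rw [hkept]
    have hi1 : toks.filter (fun x => ["IPTUNED".toList, "IPTUNING".toList].contains (PySem.Chars.upper x))
        = toks.filter (fun x => x == "IPTUNED".toList || x == "IPTUNING".toList) := by
      apply List.filter_congr
      intro x hx
      rw [(hfix x hx).2, ip_contains]
    rw [hi1]
    by_cases hip : (toks.any fun t => t == "IPTUNED".toList || t == "IPTUNING".toList) = true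
    · have hiplen : (toks.filter (fun x => x == "IPTUNED".toList || x == "IPTUNING".toList)).length > 0 := by
        rcases List.any_eq_true.mp hip with ⟨t, ht, hpt⟩
        exact List.length_pos_of_mem (List.mem_filter.mpr ⟨ht, hpt⟩)
      rw [if_pos hiplen, hip]
      have hf2 : toks.filter (fun x => !((toks.filter (fun x => x == "IPTUNED".toList || x == "IPTUNING".toList)).contains x))
          = toks.filter (fun x => !(x == "IPTUNED".toList || x == "IPTUNING".toList)) := by
        apply List.filter_congr
        intro x hx
        congr 1
        by_cases h : (x == "IPTUNED".toList || x == "IPTUNING".toList) = true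
        · have hmem : x ∈ toks.filter (fun x => x == "IPTUNED".toList || x == "IPTUNING".toList) :=
            List.mem_filter.mpr ⟨hx, h⟩
          rw [List.contains_eq_mem, decide_eq_true hmem, h]
        · have hnx : x ∉ toks.filter (fun x => x == "IPTUNED".toList || x == "IPTUNING".toList) := fun hmem =>
            h ((List.mem_filter.mp hmem).2)
          rw [List.contains_eq_mem, decide_eq_false hnx, Bool.eq_false_iff.mpr h]
      rw [hf2]
      simp
      simpa using hip
    · have hipf : (toks.any fun t => t == "IPTUNED".toList || t == "IPTUNING".toList) = false :=
        Bool.eq_false_iff.mpr hip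
      have hipnil : toks.filter (fun x => x == "IPTUNED".toList || x == "IPTUNING".toList) = [] := by
        rw [List.filter_eq_nil_iff]
        intro x hx hpx
        exact hip (List.any_eq_true.mpr ⟨x, hx, hpx⟩)
      rw [hipnil, hipf]
      rw [if_neg (by simp)]
      simp [String.ofList_toList]
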